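-- pv_equiv track=rewrite | github.com/OnYyon/EGE | task15/trainning/task3.py | check
-- ===== SOURCE A (Python) =====
-- def check(a):
--     for x in range(1, 100500):
--         f1 =  x & 49 == 0
--         f2 = x & 33 == 0
--         f3 = x & a == 0
--         if ((not f1) <= (f2 <= (not f3))) != 1:
--             return False
--     return True
-- ===== SOURCE B (Python) =====
-- def check(a):
--     # The guard fires for some x in [1, 100500) iff x&49 != 0, x&33 == 0 and
--     # x&a == 0 for some such x.  x&33 == 0 clears bits 0 and 5, so x&49 reduces
--     # to x&16; such an x disjoint from a exists (x = 16 works) iff bit 4 of a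
--     # is clear.  Hence check(a) is exactly "bit 4 of a is set".
--     return a & 16 != 0
-- ===== Notes on version B (the rewrite author's own statement) =====
-- stated objective: faster
-- what changed: B replaces the 100499-iteration brute-force loop by the closed form `a & 16 != 0`, derived by analysing which x can make the guard fire (x=16 is the canonical witness, possible iff bit 4 of a is clear).
import Mathlib
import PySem

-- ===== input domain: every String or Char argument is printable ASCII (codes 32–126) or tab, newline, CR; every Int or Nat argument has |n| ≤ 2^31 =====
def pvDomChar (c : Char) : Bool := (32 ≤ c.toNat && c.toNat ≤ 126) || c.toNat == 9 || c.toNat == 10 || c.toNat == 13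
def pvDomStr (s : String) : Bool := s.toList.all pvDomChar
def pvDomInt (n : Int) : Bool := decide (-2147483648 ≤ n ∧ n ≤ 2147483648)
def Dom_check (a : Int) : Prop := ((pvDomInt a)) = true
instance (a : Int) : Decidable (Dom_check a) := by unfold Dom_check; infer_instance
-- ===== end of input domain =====

-- B replaces A's fixed 100499-iteration search by the closed form `a & 16 != 0` (the guard can fire iff bit 4 of a is clear, with x = 16 as witness).

-- ===== PORT A =====
-- the for-loop: early `return False` when the guard fires, else continue
def checkLoop (a : Int) : List Int → Bool
  | [] => true
  | x :: rest =>
      let f1 : Bool := PySem.Int.band x 49 = 0   -- f1 = x & 49 == 0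
      let f2 : Bool := PySem.Int.band x 33 = 0   -- f2 = x & 33 == 0
      let f3 : Bool := PySem.Int.band x a = 0    -- f3 = x & a == 0
      let inner : Bool := f2 ≤ (!f3)             -- f2 <= (not f3)
      let outer : Bool := (!f1) ≤ inner          -- (not f1) <= …
      if (if outer then (1 : Int) else 0) ≠ 1    -- … != 1
      then false
      else checkLoop a rest

def check (a : Int) : Bool := checkLoop a (PySem.List.pyRange 1 100500)

-- ===== PORT B =====
def check_alt (a : Int) : Bool := decide (PySem.Int.band a 16 ≠ 0)

-- ===== PRECONDITION & SPEC =====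
def Spec_check (a : Int) (out : Bool) : Prop := out = check_alt a
instance (a : Int) (out : Bool) : Decidable (Spec_check a out) := by unfold Spec_check; infer_instance

-- ===== CLAIM (what is proved, stated in full; the proofs are below) =====
def Claim_equal_check : Prop := ∀ (a : Int), Dom_check a → Spec_check a (check a)

-- ===== LEMMAS AND PROOFS =====

-- the loop body either fires (returns false) or continues, with the fire condition spelled out
theorem checkLoop_cons (a x : Int) (rest : List Int) :
    checkLoop a (x :: rest) =
      if PySem.Int.band x 49 ≠ 0 ∧ PySem.Int.band x 33 = 0 ∧ PySem.Int.band x a = 0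
      then false else checkLoop a rest := by
  simp only [checkLoop]
  by_cases h1 : PySem.Int.band x 49 = 0 <;>
    by_cases h2 : PySem.Int.band x 33 = 0 <;>
      by_cases h3 : PySem.Int.band x a = 0 <;>
        simp [h1, h2, h3, Bool.le_iff_imp]

-- for nonnegative x, `x & b = 0` (b ≥ 0) means x.toNat &&& b.toNat = 0
theorem band_nonneg_eq_zero (x b : Int) (hx : 0 ≤ x) (hb : 0 ≤ b) :
    (PySem.Int.band x b = 0) ↔ x.toNat &&& b.toNat = 0 := by
  rw [PySem.Int.band_of_nonneg hx hb]
  omega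

-- bit 4 of x is clear whenever x is disjoint from a and bit 4 of a is set
theorem testBit4_false (a x : Int) (hx : 0 ≤ x)
    (ha : PySem.Int.band a 16 ≠ 0) (hxa : PySem.Int.band x a = 0) :
    x.toNat.testBit 4 = false := by
  by_cases hA : 0 ≤ a
  · rw [band_nonneg_eq_zero x a hx hA] at hxa
    have h16 : a.toNat &&& 16 ≠ 0 := by
      intro h
      apply ha
      rw [PySem.Int.band_of_nonneg hA (by norm_num)]
      simp [show Int.toNat 16 = 16 from rfl, h]
    have ha4 : a.toNat.testBit 4 = true := by
      by_contra h
      apply h16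
      apply Nat.eq_of_testBit_eq
      intro i
      rw [Nat.testBit_and, Nat.zero_testBit]
      rcases eq_or_ne i 4 with rfl | hi
      · simp [h] at *
      · have : (16 : Nat).testBit i = false := by
          have : (16 : Nat) = 2 ^ 4 := by norm_num
          rw [this, Nat.testBit_two_pow]
          simp [Ne.symm hi]
        simp [this]
    by_contra hx4
    have := congrArg (fun n => n.testBit 4) hxa
    simp only [Nat.testBit_and, Nat.zero_testBit] at this
    rw [ha4, eq_self_iff_true] at *
    simp only [Bool.not_eq_false] at hx4
    rw [hx4] at this
    simp at this
  · -- a < 0 : band x a = x.toNat - (x.toNat &&& (-a-1).toNat)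
    have hA' : ¬ (0 ≤ a) := hA
    rw [PySem.Int.band, if_pos hx, if_neg hA'] at hxa
    set k := (-a - 1).toNat with hk
    have hle : x.toNat &&& k ≤ x.toNat := Nat.and_le_left
    have hxk : x.toNat = x.toNat &&& k := by omega
    -- band a 16 = band 16 a = 16 - (16 &&& k); ≠ 0 means bit 4 of k is clear
    have hk4 : k.testBit 4 = false := by
      by_contra h
      apply ha
      rw [PySem.Int.band_comm, PySem.Int.band, if_pos (by norm_num : (0:Int) ≤ 16), if_neg hA']
      have h16k : (16 : Nat) &&& k = 16 := by
        apply Nat.eq_of_testBit_eq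
        intro i
        rw [Nat.testBit_and]
        rcases eq_or_ne i 4 with rfl | hi
        · simp only [Bool.not_eq_false] at h
          rw [h, Bool.and_true]
        · have : (16 : Nat).testBit i = false := by
            have h2 : (16 : Nat) = 2 ^ 4 := by norm_num
            rw [h2, Nat.testBit_two_pow]
            simp [Ne.symm hi]
          simp [this]
      rw [show (16 : Int).toNat = 16 from rfl, h16k]
      norm_num
    by_contra hx4
    simp only [Bool.not_eq_false] at hx4
    have := congrArg (fun n => n.testBit 4) hxk
    simp only [Nat.testBit_and] at this
    rw [hx4, hk4] at this
    simp at this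

-- under bit 4 of a set: x&33 = 0 and x&a = 0 force x&49 = 0, so the guard never fires
theorem no_fire (a x : Int) (hx : 0 ≤ x) (ha : PySem.Int.band a 16 ≠ 0)
    (h33 : PySem.Int.band x 33 = 0) (hxa : PySem.Int.band x a = 0) :
    PySem.Int.band x 49 = 0 := by
  rw [band_nonneg_eq_zero x 33 hx (by norm_num)] at h33
  rw [band_nonneg_eq_zero x 49 hx (by norm_num)]
  have h4 := testBit4_false a x hx ha hxa
  have h33' : x.toNat &&& 33 = 0 := by simpa using h33
  have hm0 : x.toNat.testBit 0 = false := by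
    have := congrArg (fun n => n.testBit 0) h33'
    simpa [Nat.testBit_and, show Nat.testBit 33 0 = true from by decide] using this
  have hm5 : x.toNat.testBit 5 = false := by
    have := congrArg (fun n => n.testBit 5) h33'
    simpa [Nat.testBit_and, show Nat.testBit 33 5 = true from by decide] using this
  apply Nat.eq_of_testBit_eq
  intro i
  rw [Nat.testBit_and, Nat.zero_testBit]
  by_cases hi : i < 6
  · interval_cases i
    · simp [hm0]
    · simp [show Nat.testBit 49 1 = false from by decide]
    · simp [show Nat.testBit 49 2 = false from by decide]
    · simp [show Nat.testBit 49 3 = false from by decide]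
    · simp [h4]
    · simp [hm5]
  · have : (49 : Nat).testBit i = false := by
      apply Nat.testBit_lt_two_pow
      calc (49 : Nat) < 2 ^ 6 := by norm_num
        _ ≤ 2 ^ i := Nat.pow_le_pow_right (by norm_num) (by omega)
    simp [this]

theorem loop_true (a : Int) (ha : PySem.Int.band a 16 ≠ 0) :
    ∀ l : List Int, (∀ x ∈ l, (0:Int) ≤ x) → checkLoop a l = true := by
  intro l
  induction l with
  | nil => intro _; rfl
  | cons x rest ih =>
      intro h
      rw [checkLoop_cons]
      have hx : (0:Int) ≤ x := h x (by simp)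
      rw [if_neg]
      · exact ih fun y hy => h y (by simp [hy])
      · rintro ⟨h49, h33, hxa⟩
        exact h49 (no_fire a x hx ha h33 hxa)

-- the 15 values before 16 never fire (independently of a)
theorem skip_prefix (a : Int) (l1 l2 : List Int)
    (h : ∀ x ∈ l1, PySem.Int.band x 49 = 0 ∨ PySem.Int.band x 33 ≠ 0) :
    checkLoop a (l1 ++ l2) = checkLoop a l2 := by
  induction l1 with
  | nil => rfl
  | cons x rest ih =>
      rw [List.cons_append, checkLoop_cons, if_neg]
      · exact ih fun y hy => h y (by simp [hy])
      · rintro ⟨h49, h33, _⟩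
        rcases h x (by simp) with h' | h'
        · exact h49 h'
        · exact h' h33

-- ===== VERDICT (by name: the statement is the Claim_ definition above) =====
theorem check_spec : Claim_equal_check := by
  intro a _
  unfold Spec_check check check_alt
  by_cases ha : PySem.Int.band a 16 = 0
  · -- bit 4 of a clear: the guard fires at x = 16
    rw [PySem.List.pyRange_one_append 1 16 100500 (by norm_num) (by norm_num)]
    rw [skip_prefix a _ _ (by decide)]
    rw [PySem.List.pyRange_one_cons (by norm_num : (16:Int) < 100500), checkLoop_cons]
    rw [if_pos ⟨by decide, by decide, by rw [PySem.Int.band_comm]; exact ha⟩]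
    simp [ha]
  · rw [loop_true a ha _ (fun x hx => by
      have := PySem.List.mem_pyRange_one.mp hx
      omega)]
    simp [ha]
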